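-- pv_equiv track=rewrite | github.com/tobbre/ra2223 | src/utils.py | create_pairs_and_singles_matrix
-- ===== SOURCE A (Python) =====
-- def create_pairs_and_singles_matrix(num_items):
--     pns_matrix = []
--     for i1 in range(num_items):
--         for i2 in range(i1, num_items):
--             pattern = []
--             for i in range(num_items):
--                 if i == i1 or i == i2:
--                     pattern.append(1)
--                 else:
--                     pattern.append(0)
--             pns_matrix.append(pattern)
--     return pns_matrix
-- ===== SOURCE B (Python) =====
-- def create_pairs_and_singles_matrix(num_items):
--     # One flat loop over all rows: the pair state (i1, i2) advances with an
--     # explicit carry instead of two nested loops, and each row is assembled by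
--     # concatenating zero blocks around the one or two set positions instead of testing every
--     # position.
--     rows = []
--     i1 = i2 = 0
--     while i1 < num_items:
--         if i1 == i2:
--             rows.append([0] * i1 + [1] + [0] * (num_items - i1 - 1))
--         else:
--             rows.append([0] * i1 + [1] + [0] * (i2 - i1 - 1) + [1] + [0] * (num_items - i2 - 1))
--         i2 += 1
--         if i2 == num_items:
--             i1 += 1
--             i2 = i1
--     return rows
-- ===== Notes on version B (the rewrite author's own statement) =====
-- stated objective: alternative
-- what changed: The two nested index loops with a per-position membership scan are replaced by a single flat while-loop that advances an explicit (i1,i2) carry state and emits each row as a concatenation of zero blocks around the one or two set positions.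
import Mathlib
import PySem

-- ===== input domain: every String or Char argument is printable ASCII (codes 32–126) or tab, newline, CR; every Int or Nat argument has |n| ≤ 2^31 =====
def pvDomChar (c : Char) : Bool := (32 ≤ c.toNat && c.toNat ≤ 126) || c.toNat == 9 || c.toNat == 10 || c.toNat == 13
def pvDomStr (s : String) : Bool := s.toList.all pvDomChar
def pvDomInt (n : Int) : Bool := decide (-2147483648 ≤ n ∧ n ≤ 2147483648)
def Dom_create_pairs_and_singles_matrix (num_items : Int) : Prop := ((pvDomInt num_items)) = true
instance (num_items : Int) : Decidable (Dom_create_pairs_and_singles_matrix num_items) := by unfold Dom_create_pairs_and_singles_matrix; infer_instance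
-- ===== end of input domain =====

-- B replaces A's two nested loops and per-position membership scan by ONE flat loop over rows
-- with an explicit (i1,i2) carry state, each row built by concatenating zero blocks; objective: alternative.

-- ===== PORT A =====
def create_pairs_and_singles_matrix (num_items : Int) : List (List Int) :=
  (PySem.List.pyRange 0 num_items 1).foldl (fun pns_matrix i1 =>
    (PySem.List.pyRange i1 num_items 1).foldl (fun pns_matrix i2 =>
      pns_matrix ++ [(PySem.List.pyRange 0 num_items 1).foldl
        (fun pattern i => pattern ++ [if i = i1 ∨ i = i2 then (1:Int) else 0]) []]) pns_matrix) []

-- ===== PORT B =====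
-- '[0] * k' is 'List.replicate k.toNat 0'.
def pvZeros (k : Int) : List Int := List.replicate k.toNat 0

-- The while loop of Source B as structural recursion on the state (i1, i2, rows).
-- The Python guard is 'i1 < n'; the extra 'i2 < n' conjunct is a pure totality guard:
-- it holds on every state the Python loop reaches (i1 ≤ i2 < n throughout), so the
-- computation is identical; without it the unreachable states would diverge.
def pvAltLoop (n i1 i2 : Int) (rows : List (List Int)) : List (List Int) :=
  if _h : i1 < n ∧ i2 < n then
    let row : List Int :=
      if i1 = i2 then pvZeros i1 ++ [1] ++ pvZeros (n - i1 - 1)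
      else pvZeros i1 ++ [1] ++ pvZeros (i2 - i1 - 1) ++ [1] ++ pvZeros (n - i2 - 1)
    if i2 + 1 = n then pvAltLoop n (i1 + 1) (i1 + 1) (rows ++ [row])
    else pvAltLoop n i1 (i2 + 1) (rows ++ [row])
  else rows
termination_by ((n - i1).toNat, (n - i2).toNat)
decreasing_by
  · exact Prod.Lex.left _ _ (by omega)
  · exact Prod.Lex.right _ (by omega)

def create_pairs_and_singles_matrix_alt (num_items : Int) : List (List Int) :=
  pvAltLoop num_items 0 0 []

-- ===== PRECONDITION & SPEC =====
def Spec_create_pairs_and_singles_matrix (num_items : Int) (out : List (List Int)) : Prop := out = create_pairs_and_singles_matrix_alt num_items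
instance (num_items : Int) (out : List (List Int)) : Decidable (Spec_create_pairs_and_singles_matrix num_items out) := by unfold Spec_create_pairs_and_singles_matrix; infer_instance

-- ===== CLAIM =====
def Claim_equal_create_pairs_and_singles_matrix : Prop := ∀ (num_items : Int), Dom_create_pairs_and_singles_matrix num_items → Spec_create_pairs_and_singles_matrix num_items (create_pairs_and_singles_matrix num_items)

-- ===== LEMMAS AND PROOFS =====

-- B's concatenated row as one function of the pair.
def pvRow (n i1 i2 : Int) : List Int :=
  if i1 = i2 then pvZeros i1 ++ [1] ++ pvZeros (n - i1 - 1)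
  else pvZeros i1 ++ [1] ++ pvZeros (i2 - i1 - 1) ++ [1] ++ pvZeros (n - i2 - 1)

-- One row: A's position-by-position scan equals B's concatenation of zero blocks.
theorem pv_row_eq (n i1 i2 : Int) (h0 : 0 ≤ i1) (h12 : i1 ≤ i2) (h2 : i2 < n) :
    (PySem.List.pyRange 0 n 1).map (fun i => if i = i1 ∨ i = i2 then (1:Int) else 0) =
      pvRow n i1 i2 := by
  have hone : [(1:Int)] = List.replicate 1 1 := rfl
  rw [PySem.List.pyRange_one, List.map_map]
  apply List.ext_getElem
  · simp [pvRow, pvZeros]; split_ifs <;> simp <;> omega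
  · intro k hk hk'
    have hkn : k < n.toNat := by simpa using hk
    simp only [List.getElem_map, List.getElem_range, Function.comp_apply]
    by_cases h : i1 = i2 <;>
      simp only [pvRow, pvZeros, h, if_pos, ite_false, hone, List.getElem_append,
        List.length_append, List.length_replicate, List.getElem_replicate] <;>
      split_ifs <;> omega

-- Inner phase: running B's loop from (i1, i2) until the carry fires appends exactly
-- the rows (i1, j) for j ∈ [i2, n).
theorem pv_alt_inner (n i1 : Int) :
    ∀ (m : Nat) (i2 : Int), (n - i2).toNat = m → i1 ≤ i2 → i2 < n → ∀ rows,
      pvAltLoop n i1 i2 rows =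
        pvAltLoop n (i1 + 1) (i1 + 1) (rows ++ (PySem.List.pyRange i2 n 1).map (pvRow n i1)) := by
  intro m
  induction m using Nat.strong_induction_on with
  | _ m ih =>
    intro i2 hm h12 h2 rows
    have h1 : i1 < n := lt_of_le_of_lt h12 h2
    rw [pvAltLoop, dif_pos ⟨h1, h2⟩]
    rw [PySem.List.pyRange_one_cons (by omega)]
    by_cases hlast : i2 + 1 = n
    · rw [if_pos hlast]
      have : PySem.List.pyRange (i2 + 1) n 1 = [] := by
        rw [PySem.List.pyRange_one]; simp [hlast]
      rw [this]
      simp [pvRow]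
    · rw [if_neg hlast]
      rw [ih (n - (i2 + 1)).toNat (by omega) (i2 + 1) rfl (by omega) (by omega)]
      simp [pvRow]

-- Outer phase: running B's loop from a diagonal state (i1, i1) appends all blocks for i1' ≥ i1.
theorem pv_alt_outer (n : Int) :
    ∀ (m : Nat) (i1 : Int), (n - i1).toNat = m →
      ∀ rows, pvAltLoop n i1 i1 rows =
        rows ++ (PySem.List.pyRange i1 n 1).flatMap
          (fun j => (PySem.List.pyRange j n 1).map (pvRow n j)) := by
  intro m
  induction m using Nat.strong_induction_on with
  | _ m ih =>
    intro i1 hm rows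
    by_cases h1 : i1 < n
    · rw [pv_alt_inner n i1 (n - i1).toNat i1 rfl le_rfl h1,
        ih (n - (i1 + 1)).toNat (by omega) (i1 + 1) rfl]
      simp [PySem.List.pyRange_one_cons h1]
    · rw [pvAltLoop, dif_neg (by omega)]
      have : PySem.List.pyRange i1 n 1 = [] := by
        rw [PySem.List.pyRange_one]; simp; omega
      rw [this]; simp

theorem create_pairs_and_singles_matrix_eq (n : Int) :
    create_pairs_and_singles_matrix n = create_pairs_and_singles_matrix_alt n := by
  unfold create_pairs_and_singles_matrix create_pairs_and_singles_matrix_alt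
  rw [pv_alt_outer n (n - 0).toNat 0 rfl [], List.nil_append]
  have step1 : (PySem.List.pyRange 0 n 1).foldl (fun pns_matrix i1 =>
      (PySem.List.pyRange i1 n 1).foldl (fun pns_matrix i2 =>
        pns_matrix ++ [(PySem.List.pyRange 0 n 1).foldl
          (fun pattern i => pattern ++ [if i = i1 ∨ i = i2 then (1:Int) else 0]) []]) pns_matrix) [] =
      (PySem.List.pyRange 0 n 1).foldl (fun acc i1 =>
        acc ++ (PySem.List.pyRange i1 n 1).map (pvRow n i1)) [] := by
    apply PySem.List.foldl_congr_mem
    intro acc i1 h1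
    have h1' := PySem.List.mem_pyRange_one.mp h1
    calc (PySem.List.pyRange i1 n 1).foldl (fun pns_matrix i2 =>
          pns_matrix ++ [(PySem.List.pyRange 0 n 1).foldl
            (fun pattern i => pattern ++ [if i = i1 ∨ i = i2 then (1:Int) else 0]) []]) acc
        = (PySem.List.pyRange i1 n 1).foldl (fun pns_matrix i2 =>
            pns_matrix ++ [pvRow n i1 i2]) acc := by
          apply PySem.List.foldl_congr_mem
          intro a i2 h2
          have h2' := PySem.List.mem_pyRange_one.mp h2
          rw [PySem.List.foldl_append_singleton_eq_map, List.nil_append,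
            pv_row_eq n i1 i2 h1'.1 h2'.1 h2'.2]
      _ = acc ++ (PySem.List.pyRange i1 n 1).map (pvRow n i1) :=
          PySem.List.foldl_append_singleton_eq_map _ _ _
  rw [step1]
  simpa using PySem.List.foldl_append_eq_flatMap
    (fun i1 => (PySem.List.pyRange i1 n 1).map (pvRow n i1)) (PySem.List.pyRange 0 n 1) []

-- ===== VERDICT =====
theorem create_pairs_and_singles_matrix_spec : Claim_equal_create_pairs_and_singles_matrix := by
  intro n _
  exact create_pairs_and_singles_matrix_eq n
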